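-- pv_equiv track=rewrite | github.com/wammar/sp2013.11-731 | hw3/span.py | get_free_spans
-- ===== SOURCE A (Python) =====
-- def get_subspans(l):
--     if len(l) <= 1:
--         return [l]
--     subspans = []
--     for i in range(0, len(l)):
--         for j in range(i, len(l)):
--             subspans.append(l[i:j+1])
--     return subspans
--
-- def get_free_spans(bit_array):
--
--     seqOn = False
--     spans = []
--     newSpan = []
--     for i, covered in enumerate(bit_array):
--         if not covered:
--             seqOn = True
--             newSpan.append(i)
--         elif seqOn:
--             spans += get_subspans(newSpan)
--             newSpan = []
--             seqOn = False
--
--     if newSpan != []: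
--         spans += get_subspans(newSpan)
--
--     return spans
-- ===== SOURCE B (Python) =====
-- def get_free_spans(bit_array):
--     # Two-pointer scan jumps from run to run; each run's subspans are emitted as the
--     # growing prefixes of each of its suffixes (incremental accumulation, no index slicing).
--     spans = []
--     n = len(bit_array)
--     k = 0
--     while k < n:
--         if bit_array[k]:
--             k += 1
--             continue
--         start = k
--         while k < n and not bit_array[k]:
--             k += 1
--         run = list(range(start, k))
--         while run:
--             acc = []
--             for x in run:
--                 acc = acc + [x]
--                 spans.append(acc)
--             run = run[1:]
--     return spans
-- ===== Notes on version B (the rewrite author's own statement) =====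
-- stated objective: alternative
-- what changed: B replaces A's flag-driven enumerate scan plus index-pair slicing helper by a two-pointer scan that jumps from run to run and emits each run's subspans as the growing prefixes of each of its suffixes, built by accumulation instead of slicing l[i:j+1].
import Mathlib
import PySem

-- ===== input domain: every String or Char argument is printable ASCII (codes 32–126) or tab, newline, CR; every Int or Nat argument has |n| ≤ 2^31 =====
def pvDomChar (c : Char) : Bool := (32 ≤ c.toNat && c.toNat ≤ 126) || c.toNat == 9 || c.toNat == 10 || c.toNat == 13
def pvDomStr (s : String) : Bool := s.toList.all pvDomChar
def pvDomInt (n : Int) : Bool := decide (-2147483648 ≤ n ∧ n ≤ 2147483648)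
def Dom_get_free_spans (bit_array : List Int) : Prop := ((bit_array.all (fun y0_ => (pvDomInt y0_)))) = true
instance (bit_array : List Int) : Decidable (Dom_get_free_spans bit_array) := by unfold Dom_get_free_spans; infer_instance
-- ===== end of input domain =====

-- B replaces A's flag-driven enumerate scan plus index-pair slicing helper by a two-pointer
-- scan that jumps from run to run and emits each run's subspans as the growing prefixes of
-- each of its suffixes, built by accumulation (objective: alternative decomposition).

-- ===== PORT A =====
def get_subspans (l : List Int) : List (List Int) :=
  if l.length ≤ 1 then [l]
  else
    (PySem.List.pyRange 0 (l.length : Int) 1).foldl (fun subspans i =>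
      (PySem.List.pyRange i (l.length : Int) 1).foldl (fun subspans j =>
        subspans ++ [PySem.List.slice l (some i) (some (j + 1))]) subspans) []

-- the loop body of A ('if not covered: … elif seqOn: …'), state = (seqOn, spans, newSpan)
def stepA (st : Bool × List (List Int) × List Int) (p : Int × Int) :
    Bool × List (List Int) × List Int :=
  if p.2 == 0 then (true, st.2.1, st.2.2 ++ [p.1])
  else if st.1 then (false, st.2.1 ++ get_subspans st.2.2, [])
  else st

def get_free_spans (bit_array : List Int) : List (List Int) :=
  let st := (PySem.List.enumerate bit_array 0).foldl stepA (false, [], [])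
  if st.2.2 ≠ [] then st.2.1 ++ get_subspans st.2.2 else st.2.1

-- ===== PORT B =====
-- body of B's innermost 'for x in run' loop, state = (acc, spans)
def prefStep (st : List Int × List (List Int)) (t : Int) : List Int × List (List Int) :=
  (st.1 ++ [t], st.2 ++ [st.1 ++ [t]])

-- B's 'while run:' loop: emit the prefixes of run, then continue with run[1:]
def emitRun : List Int → List (List Int) → List (List Int)
  | [], spans => spans
  | x :: rest, spans => emitRun rest ((x :: rest).foldl prefStep ([], spans)).2

-- B's inner 'while k < n and not bit_array[k]: k += 1'
-- (bit_array[k] is read with getD: the loop guard keeps k in range, as in Python)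
def scanEnd (ba : List Int) (k : Nat) : Nat :=
  if h : k < ba.length ∧ ba.getD k 0 = 0 then scanEnd ba (k + 1) else k
termination_by ba.length - k
decreasing_by omega

theorem scanEnd_ge (ba : List Int) (k : Nat) : k ≤ scanEnd ba k := by
  unfold scanEnd
  split
  · have := scanEnd_ge ba (k + 1); omega
  · exact le_refl k
termination_by ba.length - k
decreasing_by omega

theorem scanEnd_gt (ba : List Int) (k : Nat) (h1 : k < ba.length) (h2 : ba.getD k 0 = 0) :
    k < scanEnd ba k := by
  rw [scanEnd, dif_pos ⟨h1, h2⟩]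
  have := scanEnd_ge ba (k + 1); omega

-- B's outer 'while k < n:' loop
def mainLoop (ba : List Int) (k : Nat) (spans : List (List Int)) : List (List Int) :=
  if hk : k < ba.length then
    if hc : ba.getD k 0 ≠ 0 then mainLoop ba (k + 1) spans
    else
      mainLoop ba (scanEnd ba k)
        (emitRun (PySem.List.pyRange (k : Int) ((scanEnd ba k : Nat) : Int) 1) spans)
  else spans
termination_by ba.length - k
decreasing_by
  · omega
  · have := scanEnd_gt ba k hk (by omega); omega

def get_free_spans_alt (bit_array : List Int) : List (List Int) :=
  mainLoop bit_array 0 []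

-- ===== PRECONDITION & SPEC =====
def Spec_get_free_spans (bit_array : List Int) (out : List (List Int)) : Prop := out = get_free_spans_alt bit_array
instance (bit_array : List Int) (out : List (List Int)) : Decidable (Spec_get_free_spans bit_array out) := by unfold Spec_get_free_spans; infer_instance

-- ===== CLAIM (what is proved, stated in full; the proofs are below) =====
def Claim_equal_get_free_spans : Prop := ∀ (bit_array : List Int), Dom_get_free_spans bit_array → Spec_get_free_spans bit_array (get_free_spans bit_array)

-- ===== LEMMAS AND PROOFS =====

-- A's finalization: flush the pending run
def finA (st : Bool × List (List Int) × List Int) : List (List Int) :=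
  if st.2.2 ≠ [] then st.2.1 ++ get_subspans st.2.2 else st.2.1

-- the normal form both programs' per-run output is reduced to
def prefList (l : List Int) : List (List Int) :=
  (List.range l.length).map (fun m => l.take (m + 1))

def allSub (l : List Int) : List (List Int) :=
  (List.range l.length).flatMap (fun i => prefList (l.drop i))

theorem foldl_prefStep (l : List Int) (acc : List Int) (out : List (List Int)) :
    l.foldl prefStep (acc, out) =
      (acc ++ l, out ++ (List.range l.length).map (fun m => acc ++ l.take (m + 1))) := by
  induction l generalizing acc out with
  | nil => simp
  | cons x xs ih =>
    rw [List.foldl_cons]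
    show xs.foldl prefStep (acc ++ [x], out ++ [acc ++ [x]]) = _
    rw [ih, List.length_cons, List.range_succ_eq_map]
    simp [List.map_map, Function.comp_def, List.append_assoc]

theorem allSub_cons (x : Int) (xs : List Int) :
    allSub (x :: xs) = prefList (x :: xs) ++ allSub xs := by
  unfold allSub
  rw [List.length_cons, List.range_succ_eq_map, List.flatMap_cons, List.flatMap_map]
  simp

theorem emitRun_eq (run : List Int) (spans : List (List Int)) :
    emitRun run spans = spans ++ allSub run := by
  induction run generalizing spans with
  | nil => simp [emitRun, allSub]
  | cons x xs ih =>
    rw [emitRun, foldl_prefStep, ih, allSub_cons]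
    simp [prefList]

theorem get_subspans_eq (l : List Int) (h : l ≠ []) : get_subspans l = allSub l := by
  unfold get_subspans
  by_cases h1 : l.length ≤ 1
  · obtain ⟨x, t, rfl⟩ := List.exists_cons_of_ne_nil h
    have ht : t = [] := by
      cases t with
      | nil => rfl
      | cons y ys => simp at h1
    subst ht
    simp [allSub, prefList]
  · rw [if_neg h1]
    simp only [PySem.List.foldl_append_singleton_eq_map]
    rw [PySem.List.foldl_append_eq_flatMap]
    rw [List.nil_append, PySem.List.pyRange_one 0 (l.length : Int)]
    rw [List.flatMap_map]
    have hlen : ((l.length : Int) - 0).toNat = l.length := by omega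
    rw [hlen]
    unfold allSub
    apply List.flatMap_congr
    intro k _
    rw [PySem.List.pyRange_one (((0 : Int) + (k : Int))) (l.length : Int), List.map_map]
    have hlen2 : ((l.length : Int) - ((0 : Int) + (k : Int))).toNat = l.length - k := by omega
    rw [hlen2]
    unfold prefList
    rw [List.length_drop]
    apply List.map_congr_left
    intro m _
    show PySem.List.slice l (some ((0 : Int) + (k : Int))) (some ((0 : Int) + (k : Int) + (m : Int) + 1)) = _
    have e2 : ((0 : Int) + (k : Int) + (m : Int) + 1) = ((k : Nat) : Int) + (((m + 1 : Nat)) : Int) := by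
      push_cast
      ring
    have e1 : ((0 : Int) + (k : Int)) = ((k : Nat) : Int) := by omega
    rw [e2, e1, PySem.List.slice_natCast_add]

theorem scanEnd_step (ba : List Int) (k : Nat) (h1 : k < ba.length) (h2 : ba.getD k 0 = 0) :
    scanEnd ba k = scanEnd ba (k + 1) := by
  rw [scanEnd, dif_pos ⟨h1, h2⟩]

theorem scanEnd_stop (ba : List Int) (k : Nat) (h : ¬(k < ba.length ∧ ba.getD k 0 = 0)) :
    scanEnd ba k = k := by
  rw [scanEnd, dif_neg h]

theorem mainLoop_cov (ba : List Int) (k : Nat) (spans : List (List Int))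
    (hk : k < ba.length) (hc : ba.getD k 0 ≠ 0) :
    mainLoop ba k spans = mainLoop ba (k + 1) spans := by
  rw [mainLoop, dif_pos hk, dif_pos hc]

theorem mainLoop_unc (ba : List Int) (k : Nat) (spans : List (List Int))
    (hk : k < ba.length) (hc : ba.getD k 0 = 0) :
    mainLoop ba k spans =
      mainLoop ba (scanEnd ba k)
        (emitRun (PySem.List.pyRange (k : Int) ((scanEnd ba k : Nat) : Int) 1) spans) := by
  rw [mainLoop, dif_pos hk, dif_neg (not_not_intro hc)]

theorem mainLoop_end (ba : List Int) (k : Nat) (spans : List (List Int))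
    (hk : ¬ k < ba.length) : mainLoop ba k spans = spans := by
  rw [mainLoop, dif_neg hk]

theorem drop_cons_getD (ba : List Int) (k : Nat) (h : k < ba.length) :
    ba.drop k = ba.getD k 0 :: ba.drop (k + 1) := by
  rw [List.drop_eq_getElem_cons h, List.getD_eq_getElem ba 0 h]

theorem pyRange_nonempty (s i : Int) (h : s < i) : PySem.List.pyRange s i 1 ≠ [] := by
  rw [PySem.List.pyRange_one_cons h]; simp

-- the loop invariant: A's fold over the remaining suffix equals B's index loop,
-- both from an out-of-run state (left) and from mid-run (right, run started at s)
theorem loop_inv (ba : List Int) (k : Nat) :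
    (∀ spans, finA ((PySem.List.enumerate (ba.drop k) (k : Int)).foldl stepA (false, spans, []))
        = mainLoop ba k spans)
  ∧ (∀ spans (s : Nat), s < k →
      finA ((PySem.List.enumerate (ba.drop k) (k : Int)).foldl stepA
          (true, spans, PySem.List.pyRange (s : Int) (k : Int) 1))
        = mainLoop ba (scanEnd ba k)
            (emitRun (PySem.List.pyRange (s : Int) ((scanEnd ba k : Nat) : Int) 1) spans)) := by
  have hcast : ((k : Int) + 1) = ((k + 1 : Nat) : Int) := by push_cast; ring
  by_cases hk : k < ba.length
  · have hdrop := drop_cons_getD ba k hk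
    by_cases hc : ba.getD k 0 = 0
    · -- uncovered position: a run starts or continues
      rw [hc] at hdrop
      have hse := scanEnd_step ba k hk hc
      have hrange1 : PySem.List.pyRange (k : Int) ((k + 1 : Nat) : Int) 1 = [(k : Int)] := by
        rw [← hcast, PySem.List.pyRange_one_singleton]
      constructor
      · intro spans
        rw [hdrop, PySem.List.enumerate_cons, List.foldl_cons]
        have hstep : stepA (false, spans, []) ((k : Int), 0)
            = (true, spans, PySem.List.pyRange (k : Int) ((k + 1 : Nat) : Int) 1) := by
          rw [hrange1]; simp [stepA]
        rw [hstep, hcast, (loop_inv ba (k + 1)).2 spans k (by omega)]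
        rw [mainLoop_unc ba k spans hk hc, hse]
      · intro spans s hs
        rw [hdrop, PySem.List.enumerate_cons, List.foldl_cons]
        have hrange2 : PySem.List.pyRange (s : Int) ((k + 1 : Nat) : Int) 1
            = PySem.List.pyRange (s : Int) (k : Int) 1 ++ [(k : Int)] := by
          rw [← hcast, PySem.List.pyRange_one_succ_right (by exact_mod_cast hs.le)]
        have hstep : stepA (true, spans, PySem.List.pyRange (s : Int) (k : Int) 1) ((k : Int), 0)
            = (true, spans, PySem.List.pyRange (s : Int) ((k + 1 : Nat) : Int) 1) := by
          rw [hrange2]; simp [stepA]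
        rw [hstep, hcast, (loop_inv ba (k + 1)).2 spans s (by omega), hse]
    · -- covered position: any pending run is flushed
      have hstop : scanEnd ba k = k := scanEnd_stop ba k (by tauto)
      constructor
      · intro spans
        rw [hdrop, PySem.List.enumerate_cons, List.foldl_cons]
        have hstep : stepA (false, spans, []) ((k : Int), ba.getD k 0) = (false, spans, []) := by
          simp only [stepA]
          rw [if_neg (by simp only [beq_iff_eq]; exact hc)]
          simp
        rw [hstep, hcast, (loop_inv ba (k + 1)).1 spans, mainLoop_cov ba k spans hk hc]
      · intro spans s hs
        have hne := pyRange_nonempty (s : Int) (k : Int) (by exact_mod_cast hs)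
        rw [hdrop, PySem.List.enumerate_cons, List.foldl_cons]
        have hstep : stepA (true, spans, PySem.List.pyRange (s : Int) (k : Int) 1) ((k : Int), ba.getD k 0)
            = (false, spans ++ get_subspans (PySem.List.pyRange (s : Int) (k : Int) 1), []) := by
          simp only [stepA]
          rw [if_neg (by simp only [beq_iff_eq]; exact hc)]
          simp
        rw [hstep, hcast, (loop_inv ba (k + 1)).1 _, hstop,
            mainLoop_cov ba k _ hk hc, emitRun_eq, get_subspans_eq _ hne]
  · -- past the end: both loops finish
    have hdrop : ba.drop k = [] := List.drop_eq_nil_of_le (by omega)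
    have hstop : scanEnd ba k = k := scanEnd_stop ba k (by tauto)
    constructor
    · intro spans
      rw [hdrop, PySem.List.enumerate_nil, List.foldl_nil, mainLoop_end ba k spans hk]
      simp [finA]
    · intro spans s hs
      have hne := pyRange_nonempty (s : Int) (k : Int) (by exact_mod_cast hs)
      rw [hdrop, PySem.List.enumerate_nil, List.foldl_nil, hstop,
          mainLoop_end ba k _ hk, emitRun_eq]
      simp only [finA]
      rw [if_pos hne, get_subspans_eq _ hne]
termination_by ba.length - k
decreasing_by all_goals omega

-- ===== VERDICT (by name: the statement is the Claim_ definition above) =====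
theorem get_free_spans_spec : Claim_equal_get_free_spans := by
  intro bit_array _
  show get_free_spans bit_array = get_free_spans_alt bit_array
  have h := (loop_inv bit_array 0).1 []
  simp only [List.drop_zero, Nat.cast_zero] at h
  simpa [get_free_spans, get_free_spans_alt, finA] using h
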